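-- pv_equiv track=rewrite | github.com/Timta777/BruteForceProof_fork | encrypt.py | find_second_value
-- ===== SOURCE A (Python) =====
-- def calculate(hex1, hex2, operation):
--     num1 = int(hex1, 16)
--     num2 = int(hex2, 16)
--     if operation == "+":
--         result = (num1 + num2) % 256
--     elif operation == "-":
--         result = (num1 - num2) % 256
--     return result
--
-- def find_second_value(hex1, result):
--     lowest_value = None
--     operation = None
--     for i in range(256):
--         hex2 = hex(i)[2:].upper().zfill(2)
--         if calculate(hex1, hex2, '+') == result:
--             if lowest_value is None or i < int(lowest_value, 16):
--                 lowest_value = hex2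
--                 operation = '+'
--         if calculate(hex1, hex2, '-') == result:
--             if lowest_value is None or i < int(lowest_value, 16):
--                 lowest_value = hex2
--                 operation = '-'
--     return lowest_value, operation
-- ===== SOURCE B (Python) =====
-- def find_second_value(hex1, result):
--     num1 = int(hex1, 16)
--     if not 0 <= result < 256:
--         return None, None
--     i_plus = (result - num1) % 256
--     i_minus = (num1 - result) % 256
--     if i_plus <= i_minus:
--         return f"{i_plus:02X}", '+'
--     return f"{i_minus:02X}", '-'
-- ===== Notes on version B (the rewrite author's own statement) =====
-- stated objective: faster
-- what changed: Replaces the 256-iteration brute-force scan (which re-parses hex1 and formats/parses a candidate hex string every iteration) by a direct modular-arithmetic closed form: i_plus = (result-num1)%256, i_minus = (num1-result)%256, choosing '+' on ties to match A's scan order, formatting once with f'{i:02X}'.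
import Mathlib
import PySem

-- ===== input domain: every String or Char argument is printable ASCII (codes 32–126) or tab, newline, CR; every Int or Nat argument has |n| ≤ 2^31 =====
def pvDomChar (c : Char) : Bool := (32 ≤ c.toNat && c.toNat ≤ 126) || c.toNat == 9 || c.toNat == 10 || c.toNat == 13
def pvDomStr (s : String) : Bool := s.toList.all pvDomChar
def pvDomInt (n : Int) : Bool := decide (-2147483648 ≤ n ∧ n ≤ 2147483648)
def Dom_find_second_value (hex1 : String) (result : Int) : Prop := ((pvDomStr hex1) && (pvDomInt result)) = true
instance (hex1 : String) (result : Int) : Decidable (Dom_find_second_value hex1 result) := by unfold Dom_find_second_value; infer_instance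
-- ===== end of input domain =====

-- B replaces A's 256-iteration brute-force scan by a direct modular-arithmetic closed form (objective: faster by a constant factor).

-- character hex-digit value, the leaf subroutine of Python's int(·,16) (used by both ports)
def pvHexVal? (c : Char) : Option Nat :=
  if 48 ≤ c.toNat ∧ c.toNat ≤ 57 then some (c.toNat - 48)
  else if 97 ≤ c.toNat ∧ c.toNat ≤ 102 then some (c.toNat - 87)
  else if 65 ≤ c.toNat ∧ c.toNat ≤ 70 then some (c.toNat - 55)
  else none

def pvIsSpace (c : Char) : Bool := c = ' ' || c = '\t' || c = '\n' || c = '\r'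

-- ===== PORT A =====

-- digits after the first one: single underscores allowed only between digits
def pvHexCore : List Char → Nat → Option Nat
  | [], acc => some acc
  | c :: rest, acc =>
    if c = '_' then
      match rest with
      | c' :: rest' =>
        match pvHexVal? c' with
        | some v => pvHexCore rest' (acc * 16 + v)
        | none => none
      | [] => none
    else
      match pvHexVal? c with
      | some v => pvHexCore rest (acc * 16 + v)
      | none => none

-- at least one digit, which must come first
def pvHexBody : List Char → Option Nat
  | [] => none
  | c :: rest =>
    match pvHexVal? c with
    | some v => pvHexCore rest v
    | none => none

-- optional 0x/0X prefix, optionally followed by one underscore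
def pvStripPrefix (t : List Char) : List Char :=
  match t with
  | a :: b :: r =>
    if a = '0' ∧ b = 'x' then (match r with | '_' :: r' => r' | _ => r)
    else if a = '0' ∧ b = 'X' then (match r with | '_' :: r' => r' | _ => r)
    else t
  | _ => t

def pvParseSigned (t : List Char) : Option Int :=
  match t with
  | c :: r =>
    if c = '+' then (pvHexBody (pvStripPrefix r)).map (fun n => (n : Int))
    else if c = '-' then (pvHexBody (pvStripPrefix r)).map (fun n => -(n : Int))
    else (pvHexBody (pvStripPrefix (c :: r))).map (fun n => (n : Int))
  | [] => (pvHexBody (pvStripPrefix [])).map (fun n => (n : Int))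

-- int(s, 16); exact on the printable-ASCII/tab/newline/CR domain (only those whitespace chars occur); none = ValueError
def pvParseHex (s : String) : Option Int :=
  pvParseSigned (((s.toList.dropWhile pvIsSpace).reverse.dropWhile pvIsSpace).reverse)

def pvHexDigitU (n : Nat) : Char :=
  if n < 10 then Char.ofNat (48 + n) else Char.ofNat (55 + n)

-- uppercase hex digits of n; fuel = n bounds the iteration count (n/16 < n), exact for every n
def pvNatHexAux : Nat → Nat → List Char → List Char
  | _, 0, acc => acc
  | 0, _, acc => acc
  | f + 1, n, acc => pvNatHexAux f (n / 16) (pvHexDigitU (n % 16) :: acc)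

-- hex(i)[2:].upper().zfill(2) for the nonnegative i A passes
def pvToHex2 (i : Int) : String :=
  let n := i.toNat
  let ds := if n = 0 then ['0'] else pvNatHexAux n n []
  String.mk (if ds.length < 2 then List.replicate (2 - ds.length) '0' ++ ds else ds)

-- calculate(hex1, hex2, operation); none = Python raises (bad hex or unbound `result`), excluded by Pre_
def calculate (hex1 : String) (hex2 : String) (operation : String) : Option Int :=
  match pvParseHex hex1, pvParseHex hex2 with
  | some num1, some num2 =>
    if operation = "+" then some (PySem.Int.mod (num1 + num2) 256)
    else if operation = "-" then some (PySem.Int.mod (num1 - num2) 256)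
    else none
  | _, _ => none

-- `lowest_value is None or i < int(lowest_value, 16)`; getD 0 unreachable (stored strings always parse)
def pvLowOk (low : Option String) (i : Int) : Bool :=
  match low with
  | none => true
  | some lv => decide (i < (pvParseHex lv).getD 0)

-- one iteration of A's for-loop body
def pvStep (hex1 : String) (result : Int) (s : Option String × Option String) (i : Int) :
    Option String × Option String :=
  let hex2 := pvToHex2 i
  let s1 := if calculate hex1 hex2 "+" = some result ∧ pvLowOk s.1 i = true then (some hex2, some "+") else s
  if calculate hex1 hex2 "-" = some result ∧ pvLowOk s1.1 i = true then (some hex2, some "-") else s1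

def find_second_value (hex1 : String) (result : Int) : Option String × Option String :=
  (PySem.List.pyRange 0 256 1).foldl (pvStep hex1 result) (none, none)

-- ===== PORT B =====

-- B's own port of int(·,16): a single left fold over the digit characters,
-- state = (accumulated value, last char was an underscore)
def altStep (st : Option (Nat × Bool)) (c : Char) : Option (Nat × Bool) :=
  match st with
  | none => none
  | some (acc, lastUnd) =>
    if c = '_' then (if lastUnd then none else some (acc, true))
    else
      match pvHexVal? c with
      | some v => some (acc * 16 + v, false)
      | none => none

-- a parse is complete only if it did not end on an underscore
def altFin (st : Option (Nat × Bool)) : Option Nat :=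
  match st with
  | some (a, false) => some a
  | _ => none

def altBody (cs : List Char) : Option Nat :=
  match cs with
  | [] => none
  | c :: rest =>
    match pvHexVal? c with
    | none => none
    | some v => altFin (rest.foldl altStep (some (v, false)))

-- strip an 0x/0X prefix (plus at most one underscore after it)
def altStripPre (u : List Char) : List Char :=
  match u with
  | a :: b :: r =>
    if a = '0' ∧ (b = 'x' ∨ b = 'X') then (match r with | '_' :: r' => r' | _ => r) else u
  | _ => u

-- int(s,16) as strip-spaces / take-sign / strip-prefix / fold pipeline
def altParse (s : String) : Option Int :=
  let t := ((s.toList.dropWhile pvIsSpace).reverse.dropWhile pvIsSpace).reverse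
  let su : Int × List Char :=
    match t with
    | c :: r => if c = '+' then (1, r) else if c = '-' then (-1, r) else (1, t)
    | [] => (1, t)
  (altBody (altStripPre su.2)).map (fun n => su.1 * (n : Int))

def altDigitChar (d : Nat) : Char := "0123456789ABCDEF".toList.getD d '0'

-- f"{i:02X}" for the 0 ≤ i < 256 B passes: exactly two table-lookup digits
def altFmt (i : Int) : String :=
  String.mk [altDigitChar (i.toNat / 16), altDigitChar (i.toNat % 16)]

def find_second_value_alt (hex1 : String) (result : Int) : Option String × Option String :=
  match altParse hex1 with
  | none => (none, none)  -- Python raises ValueError here; excluded by Pre_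
  | some num1 =>
    if ¬(0 ≤ result ∧ result < 256) then (none, none)
    else
      let i_plus := PySem.Int.mod (result - num1) 256
      let i_minus := PySem.Int.mod (num1 - result) 256
      if i_plus ≤ i_minus then (some (altFmt i_plus), some "+")
      else (some (altFmt i_minus), some "-")

-- ===== PRECONDITION & SPEC =====
-- drop a leading '+'/'-' sign (shape helper for Pre_)
def pvSignStrip (t : List Char) : List Char :=
  match t with
  | c :: r => if c = '+' ∨ c = '-' then r else t
  | [] => t

-- the same shape as a Boolean (so that Pre_ is decided by direct evaluation)
def pvGoodTailB (cs : List Char) : Bool :=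
  cs.all (fun c => (pvHexVal? c).isSome || c == '_') &&
  (cs.zip cs.tail).all (fun p => !(p.1 == '_' && p.2 == '_')) &&
  cs.getLast? != some '_'

-- Pre_ excludes exactly the strings int(hex1, 16) rejects (ValueError in A): after stripping
-- spaces, an optional sign and an optional 0x/0X prefix, a hex digit must come first,
-- followed by hex digits with single separating underscores, no underscore at the end
def Pre_find_second_value (hex1 : String) (result : Int) : Prop :=
  (((pvStripPrefix (pvSignStrip (((hex1.toList.dropWhile pvIsSpace).reverse.dropWhile pvIsSpace).reverse))).head?.any
      (fun c => (pvHexVal? c).isSome)) &&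
   pvGoodTailB (pvStripPrefix (pvSignStrip (((hex1.toList.dropWhile pvIsSpace).reverse.dropWhile pvIsSpace).reverse))).tail) = true
instance (hex1 : String) (result : Int) : Decidable (Pre_find_second_value hex1 result) := by
  unfold Pre_find_second_value; infer_instance

def pvWitness_find_second_value : String × Int := ("1A", 5)

def Spec_find_second_value (hex1 : String) (result : Int) (out : Option String × Option String) : Prop := out = find_second_value_alt hex1 result
instance (hex1 : String) (result : Int) (out : Option String × Option String) : Decidable (Spec_find_second_value hex1 result out) := by unfold Spec_find_second_value; infer_instance

-- ===== CLAIM (what is proved, stated in full; the proofs are below) =====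
def Claim_equal_find_second_value : Prop := ∀ (hex1 : String) (result : Int), Dom_find_second_value hex1 result → Pre_find_second_value hex1 result → Spec_find_second_value hex1 result (find_second_value hex1 result)

-- ===== LEMMAS AND PROOFS =====

theorem pvHexCore_cons (c : Char) (r : List Char) (acc : Nat) :
    pvHexCore (c :: r) acc =
      if c = '_' then
        (match r with
         | c' :: rest' =>
           (match pvHexVal? c' with
            | some v => pvHexCore rest' (acc * 16 + v)
            | none => none)
         | [] => none)
      else
        (match pvHexVal? c with
         | some v => pvHexCore r (acc * 16 + v)
         | none => none) := by
  rw [pvHexCore.eq_def]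

-- ---- Pre_ characterises exactly the strings the parser accepts ----

-- Prop form of pvGoodTailB, for the proofs
def pvGoodTail (cs : List Char) : Prop :=
  (∀ c ∈ cs, (pvHexVal? c).isSome = true ∨ c = '_') ∧
  (∀ p ∈ cs.zip cs.tail, p.1 = '_' → p.2 ≠ '_') ∧
  cs.getLast? ≠ some '_'

theorem pv_hexval_ne_underscore {c : Char} (h : (pvHexVal? c).isSome = true) : c ≠ '_' := by
  intro hc; subst hc; exact absurd h (by decide)

theorem pv_good_cons {d : Char} {r : List Char} (hd : (pvHexVal? d).isSome = true) :
    pvGoodTail (d :: r) ↔ pvGoodTail r := by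
  have hne : d ≠ '_' := pv_hexval_ne_underscore hd
  unfold pvGoodTail
  constructor
  · rintro ⟨h1, h2, h3⟩
    refine ⟨fun x hx => h1 x (by simp [hx]), ?_, ?_⟩
    · intro p hp
      apply h2
      cases r with
      | nil => simp at hp
      | cons e r' => simpa using Or.inr hp
    · cases r with
      | nil => simp
      | cons e r' => simpa using h3
  · rintro ⟨h1, h2, h3⟩
    refine ⟨?_, ?_, ?_⟩
    · intro x hx
      rcases List.mem_cons.mp hx with h | h
      · subst h; exact Or.inl hd
      · exact h1 x h
    · intro p hp
      cases r with
      | nil => simp at hp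
      | cons e r' =>
        rcases List.mem_cons.mp (by simpa using hp) with h | h
        · subst h; intro hdd; exact absurd hdd hne
        · exact h2 p h
    · cases r with
      | nil => simpa using hne
      | cons e r' => simpa using h3

theorem pv_good_underscore {d : Char} {r : List Char} (hd : (pvHexVal? d).isSome = true) :
    pvGoodTail ('_' :: d :: r) ↔ pvGoodTail (d :: r) := by
  have hne : d ≠ '_' := pv_hexval_ne_underscore hd
  unfold pvGoodTail
  constructor
  · rintro ⟨h1, h2, h3⟩
    refine ⟨fun x hx => h1 x (by simp [hx]), fun p hp => h2 p (by simpa using Or.inr hp),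
      by simpa using h3⟩
  · rintro ⟨h1, h2, h3⟩
    refine ⟨?_, ?_, by simpa using h3⟩
    · intro x hx
      rcases List.mem_cons.mp hx with h | h
      · subst h; exact Or.inr rfl
      · exact h1 x h
    · intro p hp
      rcases List.mem_cons.mp (by simpa using hp) with h | h
      · subst h; intro _; exact hne
      · exact h2 p h

theorem pv_core_ne_none (cs : List Char) (acc : Nat) :
    (pvHexCore cs acc ≠ none ↔ pvGoodTail cs) := by
  have H : ∀ n (cs : List Char), cs.length ≤ n → ∀ acc : Nat,
      (pvHexCore cs acc ≠ none ↔ pvGoodTail cs) := by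
    intro n
    induction n with
    | zero =>
      intro cs hlen acc
      have hnil : cs = [] := by cases cs <;> simp_all
      subst hnil
      simp [pvHexCore, pvGoodTail]
    | succ n ihn =>
      intro cs hlen acc
      match cs with
      | [] => simp [pvHexCore, pvGoodTail]
      | c :: r =>
        by_cases hc : c = '_'
        · subst hc
          match r with
          | [] =>
            constructor
            · intro h; exact absurd (by simp [pvHexCore_cons]) h
            · rintro ⟨_, _, h3⟩; simp at h3
          | d :: r' =>
            cases hv : pvHexVal? d with
            | none =>
              constructor
              · intro h; exact absurd (by simp [pvHexCore_cons, hv]) h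
              · rintro ⟨h1, h2, _⟩
                rcases h1 d (by simp) with hd | hu
                · simp [hv] at hd
                · exact absurd hu (by simpa using h2 ('_', d) (by simp))
            | some v =>
              have hd : (pvHexVal? d).isSome = true := by simp [hv]
              have hrec := ihn r' (by simp at hlen; omega) (acc * 16 + v)
              rw [show (pvHexCore ('_' :: d :: r') acc ≠ none)
                    ↔ (pvHexCore r' (acc * 16 + v) ≠ none) from by simp [pvHexCore_cons, hv]]
              rw [hrec, pv_good_underscore hd, pv_good_cons hd]
        · cases hv : pvHexVal? c with
          | none =>
            constructor
            · intro h; exact absurd (by simp [pvHexCore_cons, hc, hv]) h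
            · rintro ⟨h1, _, _⟩
              rcases h1 c (by simp) with hd | hu
              · simp [hv] at hd
              · exact absurd hu hc
          | some v =>
            have hd : (pvHexVal? c).isSome = true := by simp [hv]
            have hrec := ihn r (by simp at hlen; omega) (acc * 16 + v)
            rw [show (pvHexCore (c :: r) acc ≠ none)
                  ↔ (pvHexCore r (acc * 16 + v) ≠ none) from by simp [pvHexCore_cons, hc, hv]]
            rw [hrec, pv_good_cons hd]
  exact H cs.length cs le_rfl acc

theorem pv_body_ne_none (v : List Char) :
    pvHexBody v ≠ none ↔
      ((v.head?.any (fun c => (pvHexVal? c).isSome)) = true ∧ pvGoodTail v.tail) := by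
  cases v with
  | nil => simp [pvHexBody]
  | cons c r =>
    cases hv : pvHexVal? c with
    | none => simp [pvHexBody, hv]
    | some w => simp [pvHexBody, hv, pv_core_ne_none r w]

theorem pv_goodtailB_iff (cs : List Char) : pvGoodTailB cs = true ↔ pvGoodTail cs := by
  unfold pvGoodTailB pvGoodTail
  simp [List.all_eq_true]
  constructor
  · rintro ⟨⟨h1, h2⟩, h3⟩
    exact ⟨h1, fun a b hab ha => (h2 a b hab).resolve_left (not_not_intro ha), h3⟩
  · rintro ⟨h1, h2, h3⟩
    refine ⟨⟨h1, fun a b hab => ?_⟩, h3⟩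
    by_cases ha : a = '_'
    · exact Or.inr (h2 a b hab ha)
    · exact Or.inl ha

theorem pv_pre_iff (hex1 : String) (result : Int) :
    Pre_find_second_value hex1 result ↔ pvParseHex hex1 ≠ none := by
  unfold Pre_find_second_value pvParseHex
  rw [Bool.and_eq_true, pv_goodtailB_iff]
  generalize (((hex1.toList.dropWhile pvIsSpace).reverse.dropWhile pvIsSpace).reverse) = t
  rw [← pv_body_ne_none]
  rcases t with _ | ⟨c, r⟩
  · simp [pvSignStrip, pvParseSigned, Option.ne_none_iff_exists']
  · by_cases hp : c = '+' <;> by_cases hm : c = '-' <;>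
      simp_all [pvSignStrip, pvParseSigned, Option.ne_none_iff_exists']


-- ---- bridge: B's parser computes int(·,16) exactly as A's parser does ----

theorem alt_foldl_none (l : List Char) : l.foldl altStep none = none := by
  induction l with
  | nil => rfl
  | cons c l ih => simpa [altStep] using ih

-- helper shape of pvHexCore's underscore branch
def pvHexCoreU (cs : List Char) (acc : Nat) : Option Nat :=
  match cs with
  | [] => none
  | c :: rest =>
    match pvHexVal? c with
    | some v => pvHexCore rest (acc * 16 + v)
    | none => none

theorem alt_core_eq (cs : List Char) : ∀ acc : Nat,
    altFin (cs.foldl altStep (some (acc, false))) = pvHexCore cs acc ∧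
    altFin (cs.foldl altStep (some (acc, true))) = pvHexCoreU cs acc := by
  induction cs with
  | nil => intro acc; exact ⟨rfl, rfl⟩
  | cons c r ih =>
    intro acc
    by_cases hc : c = '_'
    · subst hc
      refine ⟨?_, ?_⟩
      · rw [show List.foldl altStep (some (acc, false)) ('_' :: r)
              = List.foldl altStep (some (acc, true)) r from by simp [altStep],
            (ih acc).2]
        cases r with
        | nil => rfl
        | cons d r' => simp [pvHexCore_cons, pvHexCoreU]
      · rw [show List.foldl altStep (some (acc, true)) ('_' :: r)
              = List.foldl altStep none r from by simp [altStep],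
            alt_foldl_none]
        have h95 : pvHexVal? '_' = none := rfl
        simp [altFin, pvHexCoreU, h95]
    · cases hv : pvHexVal? c with
      | none =>
        refine ⟨?_, ?_⟩ <;>
          rw [show ∀ b : Bool, List.foldl altStep (some (acc, b)) (c :: r)
                = List.foldl altStep none r from by intro b; cases b <;> simp [altStep, hc, hv],
              alt_foldl_none] <;>
          simp [altFin, pvHexCore_cons, pvHexCoreU, hc, hv]
      | some v =>
        refine ⟨?_, ?_⟩ <;>
          rw [show ∀ b : Bool, List.foldl altStep (some (acc, b)) (c :: r)
                = List.foldl altStep (some (acc * 16 + v, false)) r from by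
                  intro b; cases b <;> simp [altStep, hc, hv],
              (ih (acc * 16 + v)).1] <;>
          simp [pvHexCore_cons, pvHexCoreU, hc, hv]

theorem alt_body_eq (cs : List Char) : altBody cs = pvHexBody cs := by
  cases cs with
  | nil => rfl
  | cons c r =>
    cases hv : pvHexVal? c with
    | none => simp [altBody, pvHexBody, hv]
    | some v => simp [altBody, pvHexBody, hv, (alt_core_eq r v).1]

theorem alt_strip_eq (u : List Char) : altStripPre u = pvStripPrefix u := by
  rcases u with _ | ⟨a, _ | ⟨b, r⟩⟩
  · rfl
  · rfl
  · by_cases ha : a = '0' <;> by_cases hbx : b = 'x' <;> by_cases hbX : b = 'X' <;>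
      simp_all [altStripPre, pvStripPrefix]

theorem alt_parse_eq (s : String) : altParse s = pvParseHex s := by
  unfold altParse pvParseHex
  generalize ((s.toList.dropWhile pvIsSpace).reverse.dropWhile pvIsSpace).reverse = t
  rcases t with _ | ⟨c, r⟩
  · simp [pvParseSigned, alt_body_eq, alt_strip_eq]
  · by_cases hp : c = '+' <;> by_cases hm : c = '-' <;>
      simp_all [pvParseSigned, alt_body_eq, alt_strip_eq] <;>
      cases pvHexBody (pvStripPrefix r) <;> simp

-- ---- bridge: B's two-digit formatter equals A's hex/zfill for 0 ≤ i < 256 ----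

set_option maxRecDepth 20000 in
theorem alt_fmt_eq_nat : ∀ k : Nat, k < 256 → altFmt (k : Int) = pvToHex2 (k : Int) := by
  decide

theorem alt_fmt_eq (i : Int) (h0 : 0 ≤ i) (h1 : i < 256) : altFmt i = pvToHex2 i := by
  have hk : i = ((i.toNat : Nat) : Int) := by omega
  rw [hk]; exact alt_fmt_eq_nat i.toNat (by omega)

-- ---- A-side loop characterisation ----

set_option maxRecDepth 20000 in
theorem pv_parse_toHex_nat : ∀ k : Nat, k < 256 → pvParseHex (pvToHex2 (k : Int)) = some (k : Int) := by
  decide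

theorem pv_parse_toHex (i : Int) (h0 : 0 ≤ i) (h1 : i < 256) :
    pvParseHex (pvToHex2 i) = some i := by
  have hk : i = ((i.toNat : Nat) : Int) := by omega
  rw [hk]
  exact pv_parse_toHex_nat i.toNat (by omega)

theorem pv_calc_plus {hex1 : String} {n : Int} (hn : pvParseHex hex1 = some n)
    (i : Int) (h0 : 0 ≤ i) (h1 : i < 256) :
    calculate hex1 (pvToHex2 i) "+" = some (PySem.Int.mod (n + i) 256) := by
  simp [calculate, hn, pv_parse_toHex i h0 h1]

theorem pv_calc_minus {hex1 : String} {n : Int} (hn : pvParseHex hex1 = some n)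
    (i : Int) (h0 : 0 ≤ i) (h1 : i < 256) :
    calculate hex1 (pvToHex2 i) "-" = some (PySem.Int.mod (n - i) 256) := by
  simp [calculate, hn, pv_parse_toHex i h0 h1]

theorem pv_step_none {hex1 : String} {n result : Int} (hn : pvParseHex hex1 = some n)
    (i : Int) (h0 : 0 ≤ i) (h1 : i < 256)
    (hP : ¬ (n + i) % 256 = result) (hM : ¬ (n - i) % 256 = result) :
    pvStep hex1 result (none, none) i = (none, none) := by
  simp [pvStep, pv_calc_plus hn i h0 h1, pv_calc_minus hn i h0 h1, hP, hM]

theorem pv_step_keep {hex1 : String} {n result : Int} (hn : pvParseHex hex1 = some n)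
    (i0 : Int) (hi0 : 0 ≤ i0 ∧ i0 < 256) (op : Option String)
    (i : Int) (h0 : 0 ≤ i) (h1 : i < 256) (hle : i0 ≤ i) :
    pvStep hex1 result (some (pvToHex2 i0), op) i = (some (pvToHex2 i0), op) := by
  have hlow : pvLowOk (some (pvToHex2 i0)) i = false := by
    simp [pvLowOk, pv_parse_toHex i0 hi0.1 hi0.2]; omega
  simp [pvStep, hlow]

theorem pv_step_set_plus {hex1 : String} {n result : Int} (hn : pvParseHex hex1 = some n)
    (p : Int) (h0 : 0 ≤ p) (h1 : p < 256)
    (hP : (n + p) % 256 = result) :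
    pvStep hex1 result (none, none) p = (some (pvToHex2 p), some "+") := by
  have hlow : pvLowOk (some (pvToHex2 p)) p = false := by
    simp [pvLowOk, pv_parse_toHex p h0 h1]
  simp [pvStep, pv_calc_plus hn p h0 h1, hP, pvLowOk, pv_parse_toHex p h0 h1]

theorem pv_step_set_minus {hex1 : String} {n result : Int} (hn : pvParseHex hex1 = some n)
    (q : Int) (h0 : 0 ≤ q) (h1 : q < 256)
    (hP : ¬ (n + q) % 256 = result) (hM : (n - q) % 256 = result) :
    pvStep hex1 result (none, none) q = (some (pvToHex2 q), some "-") := by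
  simp [pvStep, pv_calc_plus hn q h0 h1, pv_calc_minus hn q h0 h1, hP, hM, pvLowOk]

theorem pv_fold_none {hex1 : String} {n result : Int} (hn : pvParseHex hex1 = some n)
    (l : List Int)
    (hl : ∀ i ∈ l, 0 ≤ i ∧ i < 256 ∧ ¬ (n + i) % 256 = result ∧ ¬ (n - i) % 256 = result) :
    l.foldl (pvStep hex1 result) (none, none) = (none, none) := by
  induction l with
  | nil => rfl
  | cons a l ih =>
    obtain ⟨h0, h1, hP, hM⟩ := hl a (by simp)
    rw [List.foldl_cons, pv_step_none hn a h0 h1 hP hM]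
    exact ih (fun i hi => hl i (by simp [hi]))

theorem pv_fold_keep {hex1 : String} {n result : Int} (hn : pvParseHex hex1 = some n)
    (l : List Int) (i0 : Int) (hi0 : 0 ≤ i0 ∧ i0 < 256) (op : Option String)
    (hl : ∀ i ∈ l, 0 ≤ i ∧ i < 256 ∧ i0 ≤ i) :
    l.foldl (pvStep hex1 result) (some (pvToHex2 i0), op) = (some (pvToHex2 i0), op) := by
  induction l with
  | nil => rfl
  | cons a l ih =>
    obtain ⟨h0, h1, hle⟩ := hl a (by simp)
    rw [List.foldl_cons, pv_step_keep hn i0 hi0 op a h0 h1 hle]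
    exact ih (fun i hi => hl i (by simp [hi]))

-- ===== VERDICT (by name: the statement is the Claim_ definition above) =====
theorem find_second_value_spec : Claim_equal_find_second_value := by
  intro hex1 result _ hpre
  unfold Spec_find_second_value
  obtain ⟨n, hn⟩ : ∃ n, pvParseHex hex1 = some n := by
    cases h : pvParseHex hex1 with
    | none => exact absurd h ((pv_pre_iff hex1 result).mp hpre)
    | some n => exact ⟨n, rfl⟩
  have hmod : ∀ a : Int, PySem.Int.mod a 256 = a % 256 :=
    fun a => PySem.Int.mod_eq_emod_of_pos (by norm_num)
  unfold find_second_value find_second_value_alt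
  rw [alt_parse_eq, hn]
  by_cases hr : 0 ≤ result ∧ result < 256
  · -- result reachable: unique + index p, unique - index q
    set p : Int := PySem.Int.mod (result - n) 256 with hp
    set q : Int := PySem.Int.mod (n - result) 256 with hq
    rw [hmod] at hp hq
    have hpb : 0 ≤ p ∧ p < 256 := by omega
    have hqb : 0 ≤ q ∧ q < 256 := by omega
    have hPp : (n + p) % 256 = result := by omega
    have hMq : (n - q) % 256 = result := by omega
    have hPiff : ∀ i : Int, 0 ≤ i → i < 256 → ((n + i) % 256 = result ↔ i = p) := by
      intro i h0 h1; omega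
    have hMiff : ∀ i : Int, 0 ≤ i → i < 256 → ((n - i) % 256 = result ↔ i = q) := by
      intro i h0 h1; omega
    by_cases hple : p ≤ q
    · -- '+' wins (including ties)
      rw [PySem.List.pyRange_one_append 0 p 256 hpb.1 (by omega),
          PySem.List.pyRange_one_cons (by omega : p < (256:Int)), List.foldl_append]
      rw [pv_fold_none hn _ (by
        intro i hi
        rw [PySem.List.mem_pyRange_one] at hi
        refine ⟨hi.1, by omega, ?_, ?_⟩
        · rw [hPiff i hi.1 (by omega)]; omega
        · rw [hMiff i hi.1 (by omega)]; omega)]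
      rw [List.foldl_cons, pv_step_set_plus hn p hpb.1 hpb.2 hPp]
      rw [pv_fold_keep hn _ p hpb (some "+") (by
        intro i hi
        rw [PySem.List.mem_pyRange_one] at hi
        exact ⟨by omega, by omega, by omega⟩)]
      simp [hr]
      rw [← hp, ← hq, if_pos hple, alt_fmt_eq p hpb.1 hpb.2]
    · -- '-' wins strictly
      rw [PySem.List.pyRange_one_append 0 q 256 hqb.1 (by omega),
          PySem.List.pyRange_one_cons (by omega : q < (256:Int)), List.foldl_append]
      rw [pv_fold_none hn _ (by
        intro i hi
        rw [PySem.List.mem_pyRange_one] at hi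
        refine ⟨hi.1, by omega, ?_, ?_⟩
        · rw [hPiff i hi.1 (by omega)]; omega
        · rw [hMiff i hi.1 (by omega)]; omega)]
      rw [List.foldl_cons, pv_step_set_minus hn q hqb.1 hqb.2 (by rw [hPiff q hqb.1 hqb.2]; omega) hMq]
      rw [pv_fold_keep hn _ q hqb (some "-") (by
        intro i hi
        rw [PySem.List.mem_pyRange_one] at hi
        exact ⟨by omega, by omega, by omega⟩)]
      simp [hr]
      rw [← hp, ← hq, if_neg hple, alt_fmt_eq q hqb.1 hqb.2]
  · -- result unreachable: A's loop never matches, B's guard fires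
    rw [pv_fold_none hn _ (by
      intro i hi
      rw [PySem.List.mem_pyRange_one] at hi
      refine ⟨hi.1, hi.2, ?_, ?_⟩ <;> omega)]
    simp [hr]
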